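-- pv_equiv track=rewrite | github.com/dgoffredo/leetcode | best-time-to-buy-and-sell-stock-iii/dynamic.py | smallest_diffs
-- ===== SOURCE A (Python) =====
-- import math
--
-- def smallest_diffs(prices):
--     smallest_diff = []
--     largest = prices[0]
--     # TODO: I don't like the edge case here, but since I'm just going to be
--     #       negating these later, I don't think that zero does any harm, since
--     #       negative zero is zero.
--     for price in prices:
--         previous = smallest_diff[-1] if len(smallest_diff) > 0 else math.inf
--         smallest_diff.append(min([previous, price - largest]))
--
--         if price > largest:
--             largest = price
--
--     return smallest_diff
-- ===== SOURCE B (Python) =====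
-- def smallest_diffs(prices):
--     rm = [prices[0]]
--     for p in prices[:-1]:
--         rm.append(max(rm[-1], p))
--     diffs = [p - m for p, m in zip(prices, rm)]
--     out = []
--     cur = diffs[0]
--     for d in diffs:
--         cur = min(cur, d)
--         out.append(cur)
--     return out
-- ===== Notes on version B (the rewrite author's own statement) =====
-- stated objective: alternative
-- what changed: A's single interleaved loop (running max updated while appending running mins) is replaced by three separate passes: build a shifted prefix-max table, zip it with prices into a diffs list, then take the cumulative minimum of diffs.
import Mathlib
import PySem

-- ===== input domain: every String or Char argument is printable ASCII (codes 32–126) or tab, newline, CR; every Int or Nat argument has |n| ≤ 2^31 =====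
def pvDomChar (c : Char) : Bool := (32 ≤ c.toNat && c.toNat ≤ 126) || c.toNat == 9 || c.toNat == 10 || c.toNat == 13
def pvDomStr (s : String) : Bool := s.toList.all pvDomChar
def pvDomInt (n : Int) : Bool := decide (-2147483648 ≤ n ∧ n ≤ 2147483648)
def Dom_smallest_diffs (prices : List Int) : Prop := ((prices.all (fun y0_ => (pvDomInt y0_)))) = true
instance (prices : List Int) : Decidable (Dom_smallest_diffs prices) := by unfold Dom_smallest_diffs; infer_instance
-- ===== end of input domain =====

-- B replaces A's interleaved loop by prefix-max table + diffs + cumulative-min passes (alternative decomposition, same cost).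
-- ===== PORT A =====
-- smallest_diff[-1] if nonempty else math.inf, then min: ported as a match on getLast?
-- (min with +inf is the identity, so the none branch returns price - largest directly; exact for ints).
def smallest_diffs (prices : List Int) : List Int :=
  match prices with
  | [] => []  -- the first-element subscript raises IndexError here; excluded by Pre_
  | largest0 :: rest =>
    ((largest0 :: rest).foldl (fun (st : List Int × Int) (price : Int) =>
        let v := match st.1.getLast? with
          | some prev => min prev (price - st.2)
          | none => price - st.2
        (st.1 ++ [v], if price > st.2 then price else st.2))
      ([], largest0)).1

-- ===== PORT B =====
def smallest_diffs_alt (prices : List Int) : List Int :=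
  match prices with
  | [] => []  -- the first-element subscript raises IndexError here; excluded by Pre_
  | p0 :: rest =>
    -- prices[:-1] is dropLast
    let rm := (List.dropLast (p0 :: rest)).foldl
        (fun (acc : List Int) (p : Int) => acc ++ [max (acc.getLast?.getD p0) p]) [p0]
    let diffs := ((p0 :: rest).zip rm).map (fun pm => pm.1 - pm.2)
    let cur0 := diffs.headD 0  -- first element of diffs; nonempty here
    (diffs.foldl (fun (st : List Int × Int) (d : Int) =>
        (st.1 ++ [min st.2 d], min st.2 d)) ([], cur0)).1

-- ===== PRECONDITION & SPEC =====
-- Pre_ excludes only the empty list, on which both Pythons raise IndexError on the first-element subscript.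
def Pre_smallest_diffs (prices : List Int) : Prop := prices ≠ []
instance (prices : List Int) : Decidable (Pre_smallest_diffs prices) := by
  unfold Pre_smallest_diffs; infer_instance
def pvWitness_smallest_diffs : List Int := [3, 1, 4, 1, 5]

def Spec_smallest_diffs (prices : List Int) (out : List Int) : Prop := out = smallest_diffs_alt prices
instance (prices : List Int) (out : List Int) : Decidable (Spec_smallest_diffs prices out) := by unfold Spec_smallest_diffs; infer_instance

-- ===== CLAIM (what is proved, stated in full; the proofs are below) =====
def Claim_equal_smallest_diffs : Prop := ∀ (prices : List Int), Dom_smallest_diffs prices → Pre_smallest_diffs prices → Spec_smallest_diffs prices (smallest_diffs prices)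

-- ===== LEMMAS AND PROOFS =====

-- reference recursion for A's loop body (cm = last running min, if any; l = running max)
def gA : Option Int → Int → List Int → List Int
  | _, _, [] => []
  | cm, l, p :: r =>
    let v := match cm with | some c => min c (p - l) | none => p - l
    v :: gA (some v) (if p > l then p else l) r

-- prefix maxes of l over strictly earlier elements of the list
def pmax : Int → List Int → List Int
  | _, [] => []
  | l, p :: r => l :: pmax (max l p) r

-- running-max list as built by B's first fold
def rmL : Int → List Int → List Int
  | _, [] => []
  | m, p :: r => max m p :: rmL (max m p) r

-- cumulative minimum
def cmin : Int → List Int → List Int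
  | _, [] => []
  | c, d :: r => min c d :: cmin (min c d) r

theorem foldA (rest : List Int) : ∀ (sd : List Int) (l : Int),
    (rest.foldl (fun (st : List Int × Int) (price : Int) =>
        let v := match st.1.getLast? with
          | some prev => min prev (price - st.2)
          | none => price - st.2
        (st.1 ++ [v], if price > st.2 then price else st.2)) (sd, l)).1
      = sd ++ gA sd.getLast? l rest := by
  induction rest with
  | nil => intro sd l; simp [gA]
  | cons p r ih =>
    intro sd l
    simp only [List.foldl_cons, gA]
    rw [ih]
    cases h : sd.getLast? <;> simp [h]

theorem foldRm (xs : List Int) : ∀ (acc : List Int) (m d : Int), acc.getLast? = some m →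
    (xs.foldl (fun (acc : List Int) (p : Int) => acc ++ [max (acc.getLast?.getD d) p]) acc)
      = acc ++ rmL m xs := by
  induction xs with
  | nil => intro acc m d _; simp [rmL]
  | cons p r ih =>
    intro acc m d hm
    simp only [List.foldl_cons, hm, Option.getD_some, rmL]
    rw [ih (acc ++ [max m p]) (max m p) d (by simp)]
    simp

theorem foldCmin (ds : List Int) : ∀ (out : List Int) (c : Int),
    (ds.foldl (fun (st : List Int × Int) (d : Int) =>
        (st.1 ++ [min st.2 d], min st.2 d)) (out, c)).1 = out ++ cmin c ds := by
  induction ds with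
  | nil => intro out c; simp [cmin]
  | cons d r ih =>
    intro out c
    simp only [List.foldl_cons, cmin]
    rw [ih]
    simp

theorem rm_eq_pmax (r' : List Int) : ∀ (m r : Int),
    rmL m (List.dropLast (r :: r')) = pmax (max m r) r' := by
  induction r' with
  | nil => intro m r; simp [rmL, pmax]
  | cons s t ih =>
    intro m r
    simp only [List.dropLast_cons₂, rmL, pmax]
    rw [ih]

theorem ite_max (p l : Int) : (if p > l then p else l) = max l p := by
  rcases max_cases l p with ⟨h1, h2⟩ | ⟨h1, h2⟩ <;> rw [h1] <;> split <;> omega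

theorem key (rest : List Int) : ∀ (c l : Int),
    cmin c ((rest.zip (pmax l rest)).map (fun pm => pm.1 - pm.2)) = gA (some c) l rest := by
  induction rest with
  | nil => intro c l; simp [pmax, cmin, gA]
  | cons p r ih =>
    intro c l
    simp only [pmax, List.zip_cons_cons, List.map_cons, cmin, gA, ite_max]
    rw [ih]

-- ===== VERDICT (by name: the statement is the Claim_ definition above) =====
theorem smallest_diffs_spec : Claim_equal_smallest_diffs := by
  intro prices _ hpre
  unfold Spec_smallest_diffs
  cases prices with
  | nil => exact absurd rfl hpre
  | cons p0 rest =>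
    show smallest_diffs (p0 :: rest) = smallest_diffs_alt (p0 :: rest)
    simp only [smallest_diffs, smallest_diffs_alt]
    rw [foldA]
    rw [foldRm (List.dropLast (p0 :: rest)) [p0] p0 p0 (by simp)]
    rw [rm_eq_pmax, max_self]
    rw [foldCmin]
    simp only [List.getLast?_nil, List.nil_append, List.singleton_append, List.zip_cons_cons,
      List.map_cons, List.headD_cons, cmin, min_self, key, gA, ite_self, sub_self]
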